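-- pv_equiv track=rewrite | github.com/Patxi91/CodeWars_Cloud | 6kyu-Weird IPv6 hex string parsing-Patxi.py | parse_IPv6
-- ===== SOURCE A (Python) =====
-- def parse_IPv6(iPv6):
--     arr = [iPv6[x:x+4] for x in range(0, int(len(iPv6)/5)*5+1, 5)]
--     sums = []
--     for item in arr:
--         digits = [x for x in item]
--         s = 0
--         for digit in digits:
--             d = int(str('0x'+digit), 16)
--             s += d
--         sums.append(s)
--     return "".join(str(x) for x in sums)
-- ===== SOURCE B (Python) =====
-- def parse_IPv6(iPv6):
--     out = []
--     s = 0
--     for i, c in enumerate(iPv6):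
--         if i % 5 == 4:
--             out.append(s)
--             s = 0
--         else:
--             s += int(c, 16)
--     out.append(s)
--     return ''.join(str(x) for x in out)
-- ===== Notes on version B (the rewrite author's own statement) =====
-- stated objective: simpler
-- what changed: B makes a single pass over the string with a running sum and an index-mod-5 separator test, instead of materializing a list of 4-char slices via range arithmetic and then summing each slice in a nested loop.
import Mathlib
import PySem

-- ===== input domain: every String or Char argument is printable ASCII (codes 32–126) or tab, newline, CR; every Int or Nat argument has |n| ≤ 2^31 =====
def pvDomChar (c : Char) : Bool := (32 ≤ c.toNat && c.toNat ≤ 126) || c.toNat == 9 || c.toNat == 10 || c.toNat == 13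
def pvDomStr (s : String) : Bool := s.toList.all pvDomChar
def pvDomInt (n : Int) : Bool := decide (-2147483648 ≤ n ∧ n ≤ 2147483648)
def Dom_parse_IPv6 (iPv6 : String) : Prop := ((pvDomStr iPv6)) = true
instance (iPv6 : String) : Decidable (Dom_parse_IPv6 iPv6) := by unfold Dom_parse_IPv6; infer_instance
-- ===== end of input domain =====

-- B replaces A's slice-list construction by a single pass with a running sum (simpler decomposition, same complexity).


-- ===== PORT A =====
-- d = int('0x' + digit, 16)
def pvHexA (c : Char) : Option Int := PySem.Int.ofCharsBase? ['0', 'x', c] 16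
-- inner loop 'for digit in digits: s += d'; none models the ValueError raised by int()
def pvInnerA (so : Option Int) (digit : Char) : Option Int :=
  match so with
  | none => none
  | some s =>
    match pvHexA digit with
    | some d => some (s + d)
    | none => none
def pvSumA (item : List Char) : Option Int := item.foldl pvInnerA (some 0)
-- outer loop 'for item in arr: … sums.append(s)'
def pvOuterA (acc : Option (List Int)) (item : List Char) : Option (List Int) :=
  match acc with
  | none => none
  | some l =>
    match pvSumA item with
    | some s => some (l ++ [s])
    | none => none
def parse_IPv6 (iPv6 : String) : String :=
  let cs := iPv6.toList
  -- int(len(iPv6)/5): float true division then truncation; exact as Int division since the length is nonnegative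
  let arr := (PySem.List.pyRange 0 ((cs.length : Int) / 5 * 5 + 1) 5).map
      (fun x => PySem.List.slice cs (some x) (some (x + 4)))
  match arr.foldl pvOuterA (some []) with
  | some sums => PySem.Str.join "" (sums.map PySem.Int.toStr)
  | none => ""  -- the Python raises ValueError here; Pre_ excludes these inputs

-- ===== PORT B =====
-- d = int(c, 16); none models the ValueError
def pvHexB (c : Char) : Option Int := PySem.Int.ofCharsBase? [c] 16
-- loop body of 'for i, c in enumerate(iPv6)'
def pvStepB (st : Option (List Int × Int)) (ic : Int × Char) : Option (List Int × Int) :=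
  match st with
  | none => none
  | some (out, s) =>
    if PySem.Int.mod ic.1 5 = 4 then some (out ++ [s], 0)
    else match pvHexB ic.2 with
      | some d => some (out, s + d)
      | none => none
def parse_IPv6_alt (iPv6 : String) : String :=
  match (PySem.List.enumerate iPv6.toList).foldl pvStepB (some ([], 0)) with
  | some (out, s) => PySem.Str.join "" ((out ++ [s]).map PySem.Int.toStr)
  | none => ""  -- the Python raises ValueError here; Pre_ excludes these inputs

-- ===== PRECONDITION & SPEC =====
def pvIsHex (c : Char) : Bool := c.isDigit || ('a' ≤ c && c ≤ 'f') || ('A' ≤ c && c ≤ 'F')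
-- Pre_ excludes exactly the inputs on which the Python A raises ValueError:
-- some character whose index is not ≡ 4 (mod 5) is not a hexadecimal digit.
def Pre_parse_IPv6 (iPv6 : String) : Prop :=
  ∀ p ∈ PySem.List.enumerate iPv6.toList, PySem.Int.mod p.1 5 = 4 ∨ pvIsHex p.2 = true
instance (iPv6 : String) : Decidable (Pre_parse_IPv6 iPv6) := by unfold Pre_parse_IPv6; infer_instance
def pvWitness_parse_IPv6 : String := "1234:5678"
def Spec_parse_IPv6 (iPv6 : String) (out : String) : Prop := out = parse_IPv6_alt iPv6
instance (iPv6 : String) (out : String) : Decidable (Spec_parse_IPv6 iPv6 out) := by unfold Spec_parse_IPv6; infer_instance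

-- ===== CLAIM (what is proved, stated in full; the proofs are below) =====
def Claim_equal_parse_IPv6 : Prop := ∀ (iPv6 : String), Dom_parse_IPv6 iPv6 → Pre_parse_IPv6 iPv6 → Spec_parse_IPv6 iPv6 (parse_IPv6 iPv6)

-- ===== LEMMAS AND PROOFS =====

-- the common chunk decomposition: groups of 4 chars at distance 5
def pvChunks (cs : List Char) : List (List Char) :=
  if _h : cs.length ≤ 4 then [cs]
  else cs.take 4 :: pvChunks (cs.drop 5)
  termination_by cs.length
  decreasing_by simp; omega

def pvInnerB (so : Option Int) (c : Char) : Option Int :=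
  match so with
  | none => none
  | some a =>
    match pvHexB c with
    | some d => some (a + d)
    | none => none
def pvSumFrom (s : Int) (cs : List Char) : Option Int := cs.foldl pvInnerB (some s)

def pvScan (cs : List Char) (s : Int) : Option (List Int × Int) :=
  if _h : cs.length ≤ 4 then (pvSumFrom s cs).map (fun v => ([], v))
  else match pvSumFrom s (cs.take 4), pvScan (cs.drop 5) 0 with
    | some v, some (l, f) => some (v :: l, f)
    | _, _ => none
  termination_by cs.length
  decreasing_by simp; omega

set_option maxRecDepth 4000 in
lemma hex128 : ∀ n ∈ List.range 128, pvHexA (Char.ofNat n) = pvHexB (Char.ofNat n) := by decide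

lemma hexAB (c : Char) (h : pvDomChar c = true) : pvHexA c = pvHexB c := by
  have hlt : c.toNat < 128 := by
    simp [pvDomChar] at h; omega
  have := hex128 c.toNat (List.mem_range.mpr hlt)
  rwa [Char.ofNat_toNat] at this

lemma innerB_none (cs : List Char) : cs.foldl pvInnerB none = none := by
  induction cs with
  | nil => rfl
  | cons c cs ih => simpa [pvInnerB] using ih

lemma sumAB (cs : List Char) (hd : ∀ c ∈ cs, pvDomChar c = true) (s : Int) :
    cs.foldl pvInnerA (some s) = pvSumFrom s cs := by
  unfold pvSumFrom
  refine PySem.List.foldl_congr_mem cs pvInnerA pvInnerB (some s) (fun acc x hx => ?_)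
  simp [pvInnerA, pvInnerB, hexAB x (hd x hx)]

lemma outerA_none (its : List (List Char)) : its.foldl pvOuterA none = none := by
  induction its with
  | nil => rfl
  | cons it its ih => simpa [pvOuterA] using ih

lemma outerA_some (its : List (List Char)) (l : List Int) :
    its.foldl pvOuterA (some l) = (its.foldl pvOuterA (some [])).map (fun r => l ++ r) := by
  induction its generalizing l with
  | nil => simp
  | cons it its ih =>
    cases hs : pvSumA it with
    | none => simp [List.foldl_cons, pvOuterA, hs, outerA_none]
    | some v =>
      simp only [List.foldl_cons, pvOuterA, hs, List.nil_append]
      rw [ih (l ++ [v]), ih [v]]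
      cases its.foldl pvOuterA (some []) <;> simp

lemma outerA_cons (it : List Char) (its : List (List Char)) :
    (it :: its).foldl pvOuterA (some []) =
      match pvSumA it, its.foldl pvOuterA (some []) with
      | some v, some l => some (v :: l)
      | _, _ => none := by
  cases hs : pvSumA it with
  | none => simp [List.foldl_cons, pvOuterA, hs, outerA_none]
  | some v =>
    simp only [List.foldl_cons, pvOuterA, hs, List.nil_append]
    rw [outerA_some]
    cases its.foldl pvOuterA (some []) <;> simp

lemma stepB_none (l : List (Int × Char)) : l.foldl pvStepB none = none := by
  induction l with
  | nil => rfl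
  | cons p l ih => simpa [pvStepB] using ih

lemma pymod5 (x : Int) : PySem.Int.mod x 5 = x % 5 := by
  simp [PySem.Int.mod, Int.fmod_eq_emod]

lemma modFact (n j : Nat) (hj : j < 5) : PySem.Int.mod (5 * (n : Int) + (j : Nat)) 5 = j := by
  rw [pymod5]
  omega

-- a run of characters none of whose indices is ≡ 4 (mod 5) just accumulates the sum
lemma B_run (cs : List Char) (a : Int) (out : List Int) (s : Int)
    (h : ∀ k : Nat, k < cs.length → PySem.Int.mod (a + k) 5 ≠ 4) :
    (PySem.List.enumerate cs a).foldl pvStepB (some (out, s)) =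
      (pvSumFrom s cs).map (fun v => (out, v)) := by
  induction cs generalizing a s with
  | nil => simp [pvSumFrom]
  | cons c cs ih =>
    have h0 : PySem.Int.mod a 5 ≠ 4 := by simpa using h 0 (by simp)
    rw [PySem.List.enumerate_cons]
    simp only [List.foldl_cons, pvStepB, if_neg h0]
    cases hc : pvHexB c with
    | none => simp [stepB_none, pvSumFrom, pvInnerB, hc, innerB_none]
    | some d =>
      rw [ih (a + 1) (s + d) (fun k hk => by
        have hh := h (k + 1) (by simpa using Nat.succ_lt_succ hk)
        have he : a + 1 + (k : Int) = a + ((k : Nat) + 1 : Nat) := by push_cast; ring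
        rw [he]
        exact hh)]
      simp [pvSumFrom, pvInnerB, hc]

lemma B_main (cs : List Char) (n : Nat) (out : List Int) (s : Int) :
    (PySem.List.enumerate cs (5 * (n : Int))).foldl pvStepB (some (out, s)) =
      (pvScan cs s).map (fun p => (out ++ p.1, p.2)) := by
  by_cases hlen : cs.length ≤ 4
  · rw [pvScan, dif_pos hlen]
    rw [B_run cs (5 * (n : Int)) out s (fun k hk => by
      have hk4 : k < 4 := lt_of_lt_of_le hk hlen
      have := modFact n k (by omega)
      rw [this]; omega)]
    cases pvSumFrom s cs <;> simp
  · -- cs = take 4 ++ sep :: rest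
    have h5 : 5 ≤ cs.length := by omega
    have hsplit : cs = cs.take 4 ++ cs[4] :: cs.drop 5 := by
      conv_lhs => rw [← List.take_append_drop 4 cs]
      congr 1
      rw [show (5 : Nat) = 4 + 1 from rfl]
      exact List.drop_eq_getElem_cons (by omega)
    rw [pvScan, dif_neg hlen]
    conv_lhs => rw [hsplit]
    rw [PySem.List.enumerate_append, List.foldl_append]
    rw [B_run (cs.take 4) (5 * (n : Int)) out s (fun k hk => by
      have hk4 : k < 4 := by simp [List.length_take] at hk; omega
      have := modFact n k (by omega)
      rw [this]; omega)]
    cases hv : pvSumFrom s (cs.take 4) with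
    | none => simp [stepB_none]
    | some v =>
      have hlt : (List.take 4 cs).length = 4 := by simp; omega
      rw [PySem.List.enumerate_cons]
      simp only [Option.map_some, List.foldl_cons, pvStepB, hlt]
      rw [if_pos (by exact_mod_cast modFact n 4 (by omega))]
      have h55 : 5 * (n : Int) + (4 : Nat) + 1 = 5 * ((n + 1 : Nat) : Int) := by push_cast; ring
      rw [h55, B_main (cs.drop 5) (n + 1) (out ++ [v]) 0]
      cases hr : pvScan (cs.drop 5) 0 with
      | none => simp
      | some p => cases p with | mk l f => simp
  termination_by cs.length
  decreasing_by simp; omega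

-- A's slice list is exactly pvChunks
lemma range_chunks (q : Nat) (cs : List Char) (hq : cs.length / 5 = q) :
    (List.range (q + 1)).map (fun k => (cs.drop (5 * k)).take 4) = pvChunks cs := by
  induction q generalizing cs with
  | zero =>
    have hlen : cs.length ≤ 4 := by omega
    rw [pvChunks, dif_pos hlen]
    simp [List.take_of_length_le hlen]
  | succ q ih =>
    have hlen : ¬ cs.length ≤ 4 := by omega
    rw [pvChunks, dif_neg hlen]
    rw [List.range_succ_eq_map]
    simp only [List.map_cons, List.map_map]
    congr 1
    rw [← ih (cs.drop 5) (by simp; omega)]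
    refine List.map_congr_left (fun k _ => ?_)
    simp only [Function.comp_apply, List.drop_drop]
    congr 2
    omega

lemma arr_eq (cs : List Char) :
    (PySem.List.pyRange 0 ((cs.length : Int) / 5 * 5 + 1) 5).map
      (fun x => PySem.List.slice cs (some x) (some (x + 4))) = pvChunks cs := by
  have h5 : (0 : Int) < 5 := by norm_num
  rw [PySem.List.pyRange_of_pos 0 _ h5]
  have hb : (0 : Int) < (cs.length : Int) / 5 * 5 + 1 := by
    have : (0 : Int) ≤ (cs.length : Int) / 5 * 5 := by positivity
    omega
  rw [if_pos hb]
  have hcount : (((cs.length : Int) / 5 * 5 + 1 - 0 + 5 - 1) / 5).toNat = cs.length / 5 + 1 := by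
    omega
  rw [hcount, List.map_map]
  set q : Nat := cs.length / 5 with hqdef
  rw [← range_chunks q cs rfl]
  refine List.map_congr_left (fun k _ => ?_)
  simp only [Function.comp]
  have : (0 : Int) + 5 * (k : Int) = ((5 * k : Nat) : Int) := by push_cast; ring
  rw [this]
  have h4 : ((5 * k : Nat) : Int) + 4 = (((5 * k + 4) : Nat) : Int) := by push_cast; ring
  rw [h4, PySem.List.slice_natCast]
  congr 1
  omega

-- under Dom, A's chunk-by-chunk sums agree with B's scan
lemma bridge (cs : List Char) (hd : ∀ c ∈ cs, pvDomChar c = true) :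
    (pvChunks cs).foldl pvOuterA (some []) =
      (pvScan cs 0).map (fun p => p.1 ++ [p.2]) := by
  by_cases hlen : cs.length ≤ 4
  · rw [pvChunks, dif_pos hlen, pvScan, dif_pos hlen]
    have := sumAB cs hd 0
    simp only [List.foldl_cons, List.foldl_nil, pvOuterA, pvSumA, this]
    cases pvSumFrom 0 cs <;> simp
  · rw [pvChunks, dif_neg hlen, pvScan, dif_neg hlen]
    rw [outerA_cons]
    have ht : pvSumA (cs.take 4) = pvSumFrom 0 (cs.take 4) :=
      sumAB (cs.take 4) (fun c hc => hd c (List.mem_of_mem_take hc)) 0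
    rw [ht, bridge (cs.drop 5) (fun c hc => hd c (List.mem_of_mem_drop hc))]
    cases pvSumFrom 0 (cs.take 4) with
    | none => simp
    | some v =>
      cases pvScan (cs.drop 5) 0 with
      | none => simp
      | some p => cases p with | mk l f => simp
  termination_by cs.length
  decreasing_by simp; omega

lemma main_eq (iPv6 : String) (hd : Dom_parse_IPv6 iPv6) :
    parse_IPv6 iPv6 = parse_IPv6_alt iPv6 := by
  have hdc : ∀ c ∈ iPv6.toList, pvDomChar c = true := by
    have := hd
    unfold Dom_parse_IPv6 pvDomStr at this
    simpa [List.all_eq_true] using this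
  unfold parse_IPv6 parse_IPv6_alt
  simp only []
  rw [arr_eq, bridge iPv6.toList hdc]
  have h0 : (0 : Int) = 5 * ((0 : Nat) : Int) := by norm_num
  rw [show PySem.List.enumerate iPv6.toList = PySem.List.enumerate iPv6.toList (5 * ((0 : Nat) : Int)) by norm_num]
  rw [B_main iPv6.toList 0 [] 0]
  cases pvScan iPv6.toList 0 with
  | none => rfl
  | some p => cases p with | mk l f => simp

-- ===== VERDICT (by name: the statement is the Claim_ definition above) =====
theorem parse_IPv6_spec : Claim_equal_parse_IPv6 := by
  intro iPv6 hd _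
  unfold Spec_parse_IPv6
  exact main_eq iPv6 hd
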